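-- pv_equiv track=rewrite | github.com/BukowskiFilip/CS1114-NYU | hw7/hw5.py | get_matryoshka_list
-- ===== SOURCE A (Python) =====
-- def get_matryoshka_list(orginal_list):
--
--     if len(orginal_list) == 0:
--         return []
--     else:
--         temp_list = []
--         temp_list.append(orginal_list[0])
--         repository_list = []
--
--         for i in range(1, len(orginal_list)):
--             if orginal_list[i-1] < orginal_list[i]:
--                 temp_list.append(orginal_list[i])
--             else:
--                 repository_list.append(temp_list)
--                 temp_list = [orginal_list[i]]
--
--         repository_list.append(temp_list)
--         return(repository_list)
-- ===== SOURCE B (Python) =====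
-- def get_matryoshka_list(orginal_list):
--     result = []
--     i = 0
--     n = len(orginal_list)
--     while i < n:
--         j = i + 1
--         while j < n and orginal_list[j - 1] < orginal_list[j]:
--             j += 1
--         result.append(orginal_list[i:j])
--         i = j
--     return result
-- ===== Notes on version B (the rewrite author's own statement) =====
-- stated objective: alternative
-- what changed: Replaces A's element-by-element accumulation of a temp list and a repository with a two-index scan that finds each run's end and emits one slice per run; same O(n) cost, different traversal and state.
import Mathlib
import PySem

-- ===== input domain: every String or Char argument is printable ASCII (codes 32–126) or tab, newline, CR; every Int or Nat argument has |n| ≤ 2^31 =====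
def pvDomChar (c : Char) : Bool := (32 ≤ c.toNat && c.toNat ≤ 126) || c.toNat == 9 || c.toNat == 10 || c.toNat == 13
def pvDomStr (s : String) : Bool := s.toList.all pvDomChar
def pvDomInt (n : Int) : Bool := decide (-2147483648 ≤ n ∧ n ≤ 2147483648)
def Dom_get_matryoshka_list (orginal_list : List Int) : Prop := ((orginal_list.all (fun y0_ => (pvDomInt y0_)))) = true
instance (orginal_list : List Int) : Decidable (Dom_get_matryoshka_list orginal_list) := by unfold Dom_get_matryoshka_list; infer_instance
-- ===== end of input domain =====

-- B replaces A's element-by-element temp/repository accumulation with a two-index scan that emits one slice per increasing run (same cost, different structure).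

-- ===== PORT A =====
def get_matryoshka_list (orginal_list : List Int) : List (List Int) :=
  if orginal_list.length = 0 then []
  else
    -- temp_list = []; temp_list.append(orginal_list[0]); repository_list = []
    let st := (PySem.List.pyRange 1 orginal_list.length 1).foldl
      (fun (st : List (List Int) × List Int) i =>
        if PySem.List.pyGetD orginal_list (i - 1) 0 < PySem.List.pyGetD orginal_list i 0 then
          (st.1, st.2 ++ [PySem.List.pyGetD orginal_list i 0])
        else
          (st.1 ++ [st.2], [PySem.List.pyGetD orginal_list i 0]))
      (([] : List (List Int)), ([] : List Int) ++ [PySem.List.pyGetD orginal_list 0 0])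
    st.1 ++ [st.2]

-- ===== PORT B =====
-- inner while loop: advance j while j < n and lst[j-1] < lst[j]
def bInner (l : List Int) (j : Nat) : Nat :=
  if j < l.length ∧ PySem.List.pyGetD l ((j : Int) - 1) 0 < PySem.List.pyGetD l (j : Int) 0 then
    bInner l (j + 1)
  else j
termination_by l.length - j
decreasing_by omega

theorem bInner_ge (l : List Int) (j : Nat) : j ≤ bInner l j := by
  unfold bInner
  split
  · have h := bInner_ge l (j + 1); omega
  · exact Nat.le_refl j
termination_by l.length - j
decreasing_by omega

-- outer while loop: emit lst[i:j] per run
def bOuter (l : List Int) (i : Nat) : List (List Int) :=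
  if h : i < l.length then
    let j := bInner l (i + 1)
    PySem.List.slice l (some (i : Int)) (some (j : Int)) :: bOuter l j
  else []
termination_by l.length - i
decreasing_by
  have := bInner_ge l (i + 1)
  omega

def get_matryoshka_list_alt (orginal_list : List Int) : List (List Int) :=
  bOuter orginal_list 0

-- ===== PRECONDITION & SPEC =====
def Spec_get_matryoshka_list (orginal_list : List Int) (out : List (List Int)) : Prop := out = get_matryoshka_list_alt orginal_list
instance (orginal_list : List Int) (out : List (List Int)) : Decidable (Spec_get_matryoshka_list orginal_list out) := by unfold Spec_get_matryoshka_list; infer_instance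

-- ===== CLAIM (what is proved, stated in full; the proofs are below) =====
def Claim_equal_get_matryoshka_list : Prop := ∀ (orginal_list : List Int), Dom_get_matryoshka_list orginal_list → Spec_get_matryoshka_list orginal_list (get_matryoshka_list orginal_list)

-- ===== LEMMAS AND PROOFS =====

theorem bInner_step (l : List Int) (j : Nat) (hj : j < l.length)
    (hc : PySem.List.pyGetD l ((j : Int) - 1) 0 < PySem.List.pyGetD l (j : Int) 0) :
    bInner l j = bInner l (j + 1) := by
  rw [bInner]; rw [if_pos ⟨hj, hc⟩]

theorem bInner_stop (l : List Int) (j : Nat)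
    (h : ¬ (j < l.length ∧ PySem.List.pyGetD l ((j : Int) - 1) 0 < PySem.List.pyGetD l (j : Int) 0)) :
    bInner l j = j := by
  rw [bInner]; simp only [if_neg h]

theorem bInner_skip (l : List Int) (a b : Nat) (hab : a ≤ b) (hb : b ≤ l.length)
    (H : ∀ i : Nat, a ≤ i → i < b → PySem.List.pyGetD l ((i : Int) - 1) 0 < PySem.List.pyGetD l (i : Int) 0) :
    bInner l a = bInner l b := by
  rcases Nat.eq_or_lt_of_le hab with h | h
  · rw [h]
  · have ha : a < l.length := by omega
    rw [bInner_step l a ha (H a (Nat.le_refl a) h)]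
    exact bInner_skip l (a + 1) b h hb (fun i h1 h2 => H i (by omega) h2)
termination_by b - a
decreasing_by omega

theorem bOuter_unfold (l : List Int) (i : Nat) (h : i < l.length) :
    bOuter l i = PySem.List.slice l (some (i : Int)) (some ((bInner l (i + 1) : Nat) : Int)) :: bOuter l (bInner l (i + 1)) := by
  rw [bOuter]; simp [h]

theorem bOuter_nil (l : List Int) (i : Nat) (h : ¬ i < l.length) : bOuter l i = [] := by
  rw [bOuter]; simp [h]

theorem slice_singleton (l : List Int) (a : Nat) (ha : a < l.length) :
    PySem.List.slice l (some (a : Int)) (some ((a + 1 : Nat) : Int)) = [PySem.List.pyGetD l (a : Int) 0] := by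
  rw [PySem.List.slice_natCast]
  simp [PySem.List.pyGetD_natCast]
  rw [List.take_add_one]
  simp [List.getElem?_drop, List.getElem?_eq_getElem ha]

theorem slice_snoc (l : List Int) (s a : Nat) (hs : s ≤ a) (ha : a < l.length) :
    PySem.List.slice l (some (s : Int)) (some ((a + 1 : Nat) : Int)) =
      PySem.List.slice l (some (s : Int)) (some ((a : Nat) : Int)) ++ [PySem.List.pyGetD l (a : Int) 0] := by
  rw [PySem.List.slice_natCast, PySem.List.slice_natCast]
  have h1 : a + 1 - s = (a - s) + 1 := by omega
  rw [h1, List.take_add_one]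
  have h2 : (l.drop s)[a - s]? = some l[a] := by
    rw [List.getElem?_drop]
    have : s + (a - s) = a := by omega
    rw [this, List.getElem?_eq_getElem ha]
  simp [h2, PySem.List.pyGetD_natCast, List.getD_eq_getElem?_getD, List.getElem?_eq_getElem ha]


-- the A-loop from index a, with current run spanning [s, a), equals repo ++ the runs B emits from s
theorem main_loop (l : List Int) (a s : Nat) (repo : List (List Int))
    (h1 : 1 ≤ a) (h2 : a ≤ l.length) (hs : s < a)
    (H : ∀ i : Nat, s < i → i < a → PySem.List.pyGetD l ((i : Int) - 1) 0 < PySem.List.pyGetD l (i : Int) 0) :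
    (fun (st : List (List Int) × List Int) => st.1 ++ [st.2])
      ((PySem.List.pyRange a l.length 1).foldl
        (fun (st : List (List Int) × List Int) i =>
          if PySem.List.pyGetD l (i - 1) 0 < PySem.List.pyGetD l i 0 then
            (st.1, st.2 ++ [PySem.List.pyGetD l i 0])
          else
            (st.1 ++ [st.2], [PySem.List.pyGetD l i 0]))
        (repo, PySem.List.slice l (some (s : Int)) (some ((a : Nat) : Int))))
    = repo ++ bOuter l s := by
  have hsl : s < l.length := by omega
  rcases Nat.eq_or_lt_of_le h2 with he | hlt
  · -- a = l.length : the loop is over, B emits the final run [s, len)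
    have hnil : PySem.List.pyRange (a : Int) (l.length : Int) 1 = [] := by
      apply PySem.List.pyRange_one_eq_nil; omega
    rw [hnil]
    have hskip : bInner l (s + 1) = bInner l a := by
      apply bInner_skip l (s + 1) a (by omega) h2
      intro i hi1 hi2; exact H i (by omega) hi2
    have hstopA : bInner l a = a := by
      apply bInner_stop; rw [he]; omega
    rw [bOuter_unfold l s hsl, hskip, hstopA, he, bOuter_nil l l.length (by omega)]
    simp
  · -- a < l.length : one more loop iteration
    rw [PySem.List.pyRange_one_cons (by exact_mod_cast hlt)]
    simp only [List.foldl_cons]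
    by_cases hc : PySem.List.pyGetD l ((a : Int) - 1) 0 < PySem.List.pyGetD l (a : Int) 0
    · rw [if_pos hc, ← slice_snoc l s a (by omega) hlt]
      have hcast : (a : Int) + 1 = ((a + 1 : Nat) : Int) := by push_cast; ring
      rw [hcast]
      exact main_loop l (a + 1) s repo (by omega) (by omega) (by omega)
        (fun i hi1 hi2 => by
          rcases Nat.lt_or_ge i (a + 1) with h | h
          · rcases Nat.eq_or_lt_of_le (Nat.le_of_lt_succ h) with rfl | h'
            · exact hc
            · exact H i hi1 h'
          · omega)
    · rw [if_neg hc, ← slice_singleton l a hlt]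
      have hcast : (a : Int) + 1 = ((a + 1 : Nat) : Int) := by push_cast; ring
      rw [hcast]
      have ih := main_loop l (a + 1) a (repo ++ [PySem.List.slice l (some (s : Int)) (some ((a : Nat) : Int))])
        (by omega) (by omega) (by omega) (fun i hi1 hi2 => by omega)
      simp only [] at ih
      rw [ih]
      have hskip : bInner l (s + 1) = bInner l a := by
        apply bInner_skip l (s + 1) a (by omega) (by omega)
        intro i hi1 hi2; exact H i (by omega) hi2
      have hstopA : bInner l a = a := by
        apply bInner_stop; intro hx; exact hc hx.2
      rw [bOuter_unfold l s hsl, hskip, hstopA]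
      simp
termination_by l.length - a
decreasing_by all_goals omega

-- ===== VERDICT (by name: the statement is the Claim_ definition above) =====
theorem get_matryoshka_list_spec : Claim_equal_get_matryoshka_list := by
  intro l _
  unfold Spec_get_matryoshka_list get_matryoshka_list get_matryoshka_list_alt
  by_cases hl : l.length = 0
  · rw [if_pos hl, bOuter_nil l 0 (by omega)]
  · rw [if_neg hl]
    have h0 : 0 < l.length := by omega
    have h := main_loop l 1 0 [] (by omega) (by omega) (by omega) (fun i hi1 hi2 => by omega)
    have hs1 : PySem.List.slice l (some ((0 : Nat) : Int)) (some ((1 : Nat) : Int))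
        = [PySem.List.pyGetD l ((0 : Nat) : Int) 0] := slice_singleton l 0 h0
    simp only [Nat.cast_zero, Nat.cast_one] at hs1 h
    rw [hs1] at h
    simpa using h
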